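-- pv_equiv track=rewrite | github.com/rickorme/01-python-intro | veckouppgift_5/u3_autocomplete_list.py | autocomplete_list
-- ===== SOURCE A (Python) =====
-- def autocomplete_list(input, master_list):
--     if input == "":
--         return []
--     elif master_list == []:
--         return []
--     else:
--         input_lower = input.lower()
--         starts_with_input = [item for item in master_list if item.lower().startswith(input_lower)]
--         contains_input = [item for item in master_list if input_lower in item.lower() and not item.lower().startswith(input_lower)]
--         return sorted(starts_with_input) + sorted(contains_input)
-- ===== SOURCE B (Python) =====
-- def autocomplete_list(input, master_list):
--     if input == "" or master_list == []:
--         return []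
--     prefix = input.lower()
--     starts = []
--     contains = []
--     for item in sorted(master_list):
--         low = item.lower()
--         if low.startswith(prefix):
--             starts.append(item)
--         elif prefix in low:
--             contains.append(item)
--     return starts + contains
-- ===== Notes on version B (the rewrite author's own statement) =====
-- stated objective: alternative
-- what changed: B sorts the master list once and classifies each item in a single pass into a starts-with bucket and a contains bucket, instead of A's two filter comprehensions each followed by its own sort; equivalence rests on stability/totality of the string order.
import Mathlib
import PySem

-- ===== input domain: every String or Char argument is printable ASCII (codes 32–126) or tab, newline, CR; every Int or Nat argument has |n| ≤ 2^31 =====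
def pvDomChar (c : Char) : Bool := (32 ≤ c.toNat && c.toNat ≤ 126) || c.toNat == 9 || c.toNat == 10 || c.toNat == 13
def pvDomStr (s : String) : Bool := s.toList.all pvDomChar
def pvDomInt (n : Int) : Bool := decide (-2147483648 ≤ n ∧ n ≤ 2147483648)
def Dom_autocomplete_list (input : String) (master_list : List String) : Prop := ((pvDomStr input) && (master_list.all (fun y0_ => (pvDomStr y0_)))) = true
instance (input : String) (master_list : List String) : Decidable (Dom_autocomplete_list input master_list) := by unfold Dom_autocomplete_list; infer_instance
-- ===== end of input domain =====

-- B sorts once and classifies in a single pass (starts/contains buckets) instead of A's two filters each with its own sort; return value only, same results.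

-- ===== PORT A =====
def autocomplete_list (input : String) (master_list : List String) : List String :=
  if input == "" then []
  else if master_list == [] then []
  else
    let input_lower := PySem.Str.lower input
    let starts_with_input := master_list.filter
      (fun item => PySem.Str.startswith (PySem.Str.lower item) input_lower)
    let contains_input := master_list.filter
      (fun item => PySem.Str.isIn input_lower (PySem.Str.lower item)
        && !PySem.Str.startswith (PySem.Str.lower item) input_lower)
    PySem.List.sorted starts_with_input (fun x => x) false
      ++ PySem.List.sorted contains_input (fun x => x) false

-- ===== PORT B =====
def autocomplete_list_alt (input : String) (master_list : List String) : List String :=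
  if input == "" || master_list == [] then []
  else
    let pref := PySem.Str.lower input
    let p := (PySem.List.sorted master_list (fun x => x) false).foldl
      (fun (acc : List String × List String) item =>
        let low := PySem.Str.lower item
        if PySem.Str.startswith low pref then (acc.1 ++ [item], acc.2)
        else if PySem.Str.isIn pref low then (acc.1, acc.2 ++ [item])
        else acc) ([], [])
    p.1 ++ p.2

-- ===== PRECONDITION & SPEC =====
def Spec_autocomplete_list (input : String) (master_list : List String) (out : List String) : Prop := out = autocomplete_list_alt input master_list
instance (input : String) (master_list : List String) (out : List String) : Decidable (Spec_autocomplete_list input master_list out) := by unfold Spec_autocomplete_list; infer_instance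

-- ===== CLAIM (what is proved, stated in full; the proofs are below) =====
def Claim_equal_autocomplete_list : Prop := ∀ (input : String) (master_list : List String), Dom_autocomplete_list input master_list → Spec_autocomplete_list input master_list (autocomplete_list input master_list)

-- ===== LEMMAS AND PROOFS =====

-- B's classifying fold returns the two filtered sublists of its traversal order.
theorem foldl_classify (p q : String → Bool) (l : List String) (a b : List String) :
    l.foldl (fun (acc : List String × List String) item =>
        if p item then (acc.1 ++ [item], acc.2)
        else if q item then (acc.1, acc.2 ++ [item])
        else acc) (a, b)
    = (a ++ l.filter p, b ++ l.filter (fun x => !p x && q x)) := by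
  induction l generalizing a b with
  | nil => simp
  | cons x xs ih =>
    by_cases hp : p x <;> by_cases hq : q x <;>
      simp [List.foldl_cons, hp, hq, ih]

-- sorting after filtering = filtering the sorted list (total order, stable sort).
theorem sorted_filter (p : String → Bool) (l : List String) :
    PySem.List.sorted (l.filter p) (fun x => x) false
      = (PySem.List.sorted l (fun x => x) false).filter p := by
  apply PySem.List.sorted_id_eq_of_perm_of_pairwise
  · exact (PySem.List.sorted_perm l (fun x => x) false).filter p
  · exact List.Pairwise.sublist List.filter_sublist (PySem.List.sorted_pairwise l (fun x => x))

-- ===== VERDICT (by name: the statement is the Claim_ definition above) =====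
theorem autocomplete_list_spec : Claim_equal_autocomplete_list := by
  intro input master_list _
  unfold Spec_autocomplete_list autocomplete_list autocomplete_list_alt
  by_cases h1 : input == ""
  · simp [h1]
  · by_cases h2 : master_list == []
    · simp [h1, h2]
    · have e1 : (input == "") = false := by simpa using h1
      have e2 : (master_list == []) = false := by simpa using h2
      simp only [e1, e2, Bool.false_or, Bool.false_eq_true, if_false]
      rw [foldl_classify, List.nil_append, List.nil_append,
        ← sorted_filter, ← sorted_filter]
      congr 1
      · congr 1
        apply List.filter_congr
        intro x _
        cases PySem.Str.startswith (PySem.Str.lower x) (PySem.Str.lower input) <;>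
          cases PySem.Str.isIn (PySem.Str.lower input) (PySem.Str.lower x) <;> rfl
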